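-- pv_equiv track=rewrite | github.com/anurag1703/Agentic-Text-Extraction-and-Database-Integration-for-Identity-Documents | tools/data_validator.py | pin_in_valid_range
-- ===== SOURCE A (Python) =====
-- _PIN_PREFIX_RANGES = [
--     (110000, 119999),  # Delhi and nearby (example 11xxxx)
--     (120000, 139999),  # Haryana / Punjab ranges included in 12-13 etc
--     (140000, 159999),  # Punjab / Chandigarh / Haryana subset
--     (160000, 199999),  # Himachal / Jammu etc
--     (200000, 289999),  # UP / Uttarakhand
--     (300000, 349999),  # Rajasthan
--     (360000, 399999),  # Gujarat + small exceptions
--     (400000, 449999),  # Maharashtra / Goa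
--     (450000, 489999),  # Madhya Pradesh
--     (490000, 499999),  # Chhattisgarh
--     (500000, 539999),  # Telangana / Andhra
--     (560000, 599999),  # Karnataka
--     (600000, 669999),  # Tamil Nadu / Puducherry
--     (670000, 699999),  # Kerala / Lakshadweep
--     (700000, 749999),  # West Bengal / Sikkim / Andaman & Nicobar etc
--     (750000, 799999),  # Odisha / NE states subset
--     (800000, 859999),  # Bihar / Jharkhand
--     (900000, 999999),  # Army Postal Service / special zones
-- ]
--
-- def pin_in_valid_range(pin: str) -> bool:
--     try:
--         num = int(pin)
--     except Exception:
--         return False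
--     for lo, hi in _PIN_PREFIX_RANGES:
--         if lo <= num <= hi:
--             return True
--     return False
-- ===== SOURCE B (Python) =====
-- _PIN_PREFIX_RANGES = [
--     (110000, 119999),
--     (120000, 139999),
--     (140000, 159999),
--     (160000, 199999),
--     (200000, 289999),
--     (300000, 349999),
--     (360000, 399999),
--     (400000, 449999),
--     (450000, 489999),
--     (490000, 499999),
--     (500000, 539999),
--     (560000, 599999),
--     (600000, 669999),
--     (670000, 699999),
--     (700000, 749999),
--     (750000, 799999),
--     (800000, 859999),
--     (900000, 999999),
-- ]
--
-- # Flat sorted boundary table: each inclusive range [lo, hi] contributes the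
-- # half-open endpoints lo and hi+1; num is inside some range iff its
-- # bisect-right insertion index into this table is odd.
-- _BOUNDS = sorted(b for lo, hi in _PIN_PREFIX_RANGES for b in (lo, hi + 1))
--
-- def pin_in_valid_range(pin: str) -> bool:
--     try:
--         num = int(pin)
--     except Exception:
--         return False
--     lo, hi = 0, len(_BOUNDS)
--     while lo < hi:           # hand-rolled bisect_right
--         mid = (lo + hi) // 2
--         if num < _BOUNDS[mid]:
--             hi = mid
--         else:
--             lo = mid + 1
--     return lo % 2 == 1
-- ===== Notes on version B (the rewrite author's own statement) =====
-- stated objective: alternative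
-- what changed: Replaces the linear scan over the 18 inclusive (lo, hi) ranges by a precomputed flat sorted table of interval endpoints (lo and hi+1 each) and a hand-rolled bisect_right binary search: the PIN is valid iff the insertion index of the parsed number is odd.
import Mathlib
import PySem

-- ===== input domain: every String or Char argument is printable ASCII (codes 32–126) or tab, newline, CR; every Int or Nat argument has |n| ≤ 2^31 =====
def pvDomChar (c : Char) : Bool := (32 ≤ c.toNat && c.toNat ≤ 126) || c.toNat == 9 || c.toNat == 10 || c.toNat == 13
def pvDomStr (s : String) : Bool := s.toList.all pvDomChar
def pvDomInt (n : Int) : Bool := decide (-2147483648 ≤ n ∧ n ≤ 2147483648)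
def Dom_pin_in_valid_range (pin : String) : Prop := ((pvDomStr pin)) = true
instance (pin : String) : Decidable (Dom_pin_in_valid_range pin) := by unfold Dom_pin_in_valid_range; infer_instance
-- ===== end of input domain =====

-- B replaces A's linear scan of the 18 inclusive ranges by a hand-rolled binary search over a
-- precomputed sorted boundary table with an odd-index parity test (alternative algorithm, same cost at this size).

-- ===== PORT A =====
def pinPrefixRanges : List (Int × Int) :=
  [(110000, 119999), (120000, 139999), (140000, 159999), (160000, 199999),
   (200000, 289999), (300000, 349999), (360000, 399999), (400000, 449999),
   (450000, 489999), (490000, 499999), (500000, 539999), (560000, 599999),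
   (600000, 669999), (670000, 699999), (700000, 749999), (750000, 799999),
   (800000, 859999), (900000, 999999)]

-- A's for-loop with its early `return True`
def pinLoopA : List (Int × Int) → Int → Bool
  | [], _ => false
  | (lo, hi) :: rest, num => if lo ≤ num ∧ num ≤ hi then true else pinLoopA rest num

def pin_in_valid_range (pin : String) : Bool :=
  match PySem.Int.ofStr? pin with   -- try: int(pin) / except: return False
  | none => false
  | some num => pinLoopA pinPrefixRanges num

-- ===== PORT B =====
-- _BOUNDS = sorted(b for lo, hi in _PIN_PREFIX_RANGES for b in (lo, hi + 1))
def pinBounds : List Int :=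
  PySem.List.sorted (pinPrefixRanges.flatMap (fun p => [p.1, p.2 + 1])) (fun x => x)

-- B's while-loop (hand-rolled bisect_right); lo/hi are nonnegative Python ints, so Nat;
-- the getD default is never read (lo ≤ mid < hi ≤ length throughout)
def pinBsearch (num : Int) (lo hi : Nat) : Nat :=
  if lo < hi then
    let mid := (lo + hi) / 2
    if num < pinBounds.getD mid 0 then pinBsearch num lo mid
    else pinBsearch num (mid + 1) hi
  else lo
termination_by hi - lo
decreasing_by all_goals omega

def pin_in_valid_range_alt (pin : String) : Bool :=
  match PySem.Int.ofStr? pin with   -- try: int(pin) / except: return False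
  | none => false
  | some num => pinBsearch num 0 pinBounds.length % 2 == 1

-- ===== PRECONDITION & SPEC =====
def Spec_pin_in_valid_range (pin : String) (out : Bool) : Prop := out = pin_in_valid_range_alt pin
instance (pin : String) (out : Bool) : Decidable (Spec_pin_in_valid_range pin out) := by unfold Spec_pin_in_valid_range; infer_instance

-- ===== CLAIM (what is proved, stated in full; the proofs are below) =====
def Claim_equal_pin_in_valid_range : Prop := ∀ (pin : String), Dom_pin_in_valid_range pin → Spec_pin_in_valid_range pin (pin_in_valid_range pin)

-- ===== LEMMAS AND PROOFS =====

-- the sorted boundary table, evaluated once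
lemma pinBounds_eq : pinBounds =
  [110000, 120000, 120000, 140000, 140000, 160000, 160000, 200000, 200000, 290000,
   300000, 350000, 360000, 400000, 400000, 450000, 450000, 490000, 490000, 500000,
   500000, 540000, 560000, 600000, 600000, 670000, 670000, 700000, 700000, 750000,
   750000, 800000, 800000, 860000, 900000, 1000000] := by decide

-- core: for every parsed integer, A's range scan agrees with B's binary search + parity test
set_option maxHeartbeats 2000000 in
lemma pin_core (num : Int) :
    pinLoopA pinPrefixRanges num = (pinBsearch num 0 pinBounds.length % 2 == 1) := by
  rw [show pinBounds.length = 36 from rfl]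
  simp only [pinLoopA, pinPrefixRanges]
  repeat (rw [pinBsearch]; try norm_num [pinBounds_eq, List.getD])
  split_ifs <;> simp <;> omega

-- ===== VERDICT (by name: the statement is the Claim_ definition above) =====
theorem pin_in_valid_range_spec : Claim_equal_pin_in_valid_range := by
  intro pin _
  unfold Spec_pin_in_valid_range pin_in_valid_range pin_in_valid_range_alt
  cases PySem.Int.ofStr? pin with
  | none => rfl
  | some num => exact pin_core num
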